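-- pv_equiv track=rewrite | github.com/MuhammadHaaris278/EHR---Context-Aware-Suggestions | app/llm_pipeline.py | _extract_mistral_management
-- ===== SOURCE A (Python) =====
-- from typing import Dict, List, Optional, Any, Tuple
--
-- def _extract_mistral_management(content: List[str]) -> List[str]:
--     """Extract immediate management from Mistral AI with better parsing."""
--     management_items = []
--     current_item = ""
--
--     for line in content:
--         if not line:
--             continue
--
--         # Check if this starts a new management item
--         if (line.startswith(('-', '•', '*')) or
--             any(char.isdigit() and char in line[:5] for char in "12345") or
--             line.endswith(':') or
--             any(keyword in line.lower() for keyword in ["monitor", "administer", "discontinue", "start", "stop", "assess"])):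
--
--             # Save previous item
--             if current_item and len(current_item) > 15:
--                 management_items.append(current_item.strip())
--
--             # Start new item
--             current_item = line.lstrip('- • * 1234567890. ')
--         else:
--             # Continue current item
--             if current_item:
--                 current_item += " " + line
--             else:
--                 current_item = line
--
--     # Add the last item
--     if current_item and len(current_item) > 15:
--         management_items.append(current_item.strip())
--
--     return management_items[:8]  # Limit to 8 items
-- ===== SOURCE B (Python) =====
-- # B: two-phase re-implementation — split the non-empty lines into groups at each
-- # "start" line, then render each group with a single join; stops after 8 items.
-- _KEYWORDS = ("monitor", "administer", "discontinue", "start", "stop", "assess")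
--
--
-- def _starts_item(line):
--     low = line.lower()
--     return (line[0] in "-\u2022*"
--             or any(c in line[:5] for c in "12345")
--             or line.endswith(':')
--             or any(k in low for k in _KEYWORDS))
--
--
-- def _extract_mistral_management(content):
--     lines = [l for l in content if l]
--     items = []
--     i = 0
--     first = True
--     n = len(lines)
--     while i < n:
--         line = lines[i]
--         if first and not _starts_item(line):
--             head = line
--         else:
--             head = line.lstrip('- • * 1234567890. ')
--         first = False
--         j = i + 1
--         while j < n and not _starts_item(lines[j]):
--             j += 1
--         item = " ".join(p for p in [head] + lines[i + 1:j] if p)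
--         if len(item) > 15:
--             items.append(item.strip())
--             if len(items) == 8:
--                 break
--         i = j
--     return items
-- ===== Notes on version B (the rewrite author's own statement) =====
-- stated objective: alternative
-- what changed: B replaces A's single fold carrying (items, current_item) state by an explicit two-phase grouping: an index-based while loop that spans each group (header line plus following non-start lines) at once, renders the item with a single join over the group, and breaks as soon as 8 items are collected instead of collecting all and slicing.
import Mathlib
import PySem

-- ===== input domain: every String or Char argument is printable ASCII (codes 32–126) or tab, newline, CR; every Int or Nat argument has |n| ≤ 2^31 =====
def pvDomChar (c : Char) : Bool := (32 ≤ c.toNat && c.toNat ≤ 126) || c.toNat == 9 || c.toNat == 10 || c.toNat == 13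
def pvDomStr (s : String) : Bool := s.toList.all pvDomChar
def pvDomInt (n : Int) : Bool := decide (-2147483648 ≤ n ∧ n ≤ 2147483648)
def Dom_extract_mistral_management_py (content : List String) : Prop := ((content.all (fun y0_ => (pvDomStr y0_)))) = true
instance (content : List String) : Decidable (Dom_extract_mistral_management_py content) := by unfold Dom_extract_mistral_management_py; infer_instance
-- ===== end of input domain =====

-- B re-implements the extraction as an explicit two-phase grouping (split the
-- non-empty lines at each "start" line, render each group with one join) and
-- stops as soon as 8 items are collected; same return value as A on all inputs.


-- ===== PORT A =====
-- the keyword list (shared constant of both Python sources, written once)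
def pvKeywords : List (List Char) :=
  ["monitor".toList, "administer".toList, "discontinue".toList,
   "start".toList, "stop".toList, "assess".toList]

-- line.lstrip('- • * 1234567890. ')  — Python's lstrip with a char set, ported by
-- hand (exact: drops the longest prefix of characters belonging to the set)
def pvLstripBullets (l : List Char) : List Char :=
  l.dropWhile (fun c => "- • * 1234567890. ".toList.contains c)

-- A's start-of-item condition, clause for clause
def pvAStart (l : List Char) : Bool :=
  (PySem.Chars.startswith l "-".toList || PySem.Chars.startswith l "•".toList
    || PySem.Chars.startswith l "*".toList)
  || ("12345".toList.any (fun c =>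
        PySem.Chars.isdigit c && PySem.Chars.isIn [c] (PySem.List.slice l none (some 5))))
  || PySem.Chars.endswith l ":".toList
  || (pvKeywords.any (fun kw => PySem.Chars.isIn kw (PySem.Chars.lower l)))

-- A's for-loop: state = (management_items, current_item)
def pvALoop : List (List Char) → List (List Char) × List Char → List (List Char) × List Char
  | [], st => st
  | l :: rest, (items, cur) =>
    if l.isEmpty then pvALoop rest (items, cur)
    else if pvAStart l then
      pvALoop rest
        ((if !cur.isEmpty && decide (15 < cur.length) then items ++ [PySem.Chars.strip cur] else items),
         pvLstripBullets l)
    else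
      pvALoop rest (items, if !cur.isEmpty then cur ++ ' ' :: l else l)

def extract_mistral_management_py (content : List String) : List String :=
  let st := pvALoop (content.map String.toList) ([], [])
  let items := if !st.2.isEmpty && decide (15 < st.2.length) then st.1 ++ [PySem.Chars.strip st.2] else st.1
  (items.take 8).map String.ofList

-- ===== PORT B =====
-- B's start condition ('line[0] in "-•*"' and single-char 'c in line[:5]'
-- ported as head/membership tests — exact for one-character needles)
def pvBStart (l : List Char) : Bool :=
  (match l.head? with | some c => "-•*".toList.contains c | none => false)
  || ("12345".toList.any (fun c => (l.take 5).contains c))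
  || PySem.Chars.endswith l ":".toList
  || (pvKeywords.any (fun kw => PySem.Chars.isIn kw (PySem.Chars.lower l)))

-- B's while loop: take one group (header + following non-start lines) per step;
-- k = number of items still wanted (8 at the top, break when it reaches 0)
def pvBLoop : Bool → Nat → List (List Char) → List (List Char)
  | _, _, [] => []
  | first, k, l :: rest =>
    let head := if first && !pvBStart l then l else pvLstripBullets l
    let cont := rest.takeWhile (fun x => !pvBStart x)
    let rest' := rest.dropWhile (fun x => !pvBStart x)
    let item := PySem.Chars.join " ".toList ((head :: cont).filter (fun p => !p.isEmpty))
    if decide (15 < item.length) then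
      PySem.Chars.strip item :: (if k = 1 then [] else pvBLoop false (k - 1) rest')
    else
      pvBLoop false k rest'
  termination_by _ _ ls => ls.length
  decreasing_by all_goals
    simpa using Nat.lt_succ_of_le (List.length_dropWhile_le _ _)

def extract_mistral_management_py_alt (content : List String) : List String :=
  (pvBLoop true 8 ((content.map String.toList).filter (fun l => !l.isEmpty))).map String.ofList

-- ===== PRECONDITION & SPEC =====
def Spec_extract_mistral_management_py (content : List String) (out : List String) : Prop := out = extract_mistral_management_py_alt content
instance (content : List String) (out : List String) : Decidable (Spec_extract_mistral_management_py content out) := by unfold Spec_extract_mistral_management_py; infer_instance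

-- ===== CLAIM (what is proved, stated in full; the proofs are below) =====
def Claim_equal_extract_mistral_management_py : Prop := ∀ (content : List String), Dom_extract_mistral_management_py content → Spec_extract_mistral_management_py content (extract_mistral_management_py content)

-- ===== LEMMAS AND PROOFS =====

-- the two start conditions agree
lemma startswith_single (a c : Char) (r : List Char) :
    PySem.Chars.startswith (a :: r) [c] = (a == c) := by
  rcases hb : (a == c) with _|_
  · rcases hs : PySem.Chars.startswith (a::r) [c] with _|_
    · rfl
    · rw [PySem.Chars.startswith_iff] at hs
      simp_all [List.prefix_iff_eq_take]
  · have h2 : PySem.Chars.startswith (a::r) [c] = true :=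
      (PySem.Chars.startswith_iff _ _).mpr (by simp_all)
    rw [h2]

lemma isIn_single (c : Char) (xs : List Char) :
    PySem.Chars.isIn [c] xs = xs.contains c := by
  rcases h : PySem.Chars.isIn [c] xs with _|_
  · rw [PySem.Chars.isIn_eq_false_iff] at h
    simp only [List.singleton_infix_iff] at h; simp [h]
  · rw [PySem.Chars.isIn_iff_infix] at h
    simp only [List.singleton_infix_iff] at h; simp [h]

lemma slice5 (l : List Char) : PySem.List.slice l none (some 5) = l.take 5 := by
  rw [show (5:Int) = ((5:Nat):Int) by norm_num, PySem.List.slice_to] <;> simp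

lemma start_eq (l : List Char) : pvBStart l = pvAStart l := by
  cases l with
  | nil => decide
  | cons a r =>
    simp only [pvAStart, pvBStart, isIn_single, slice5, List.head?_cons,
      show "-".toList = ['-'] from rfl, show "\u2022".toList = ['\u2022'] from rfl,
      show "*".toList = ['*'] from rfl, show "-\u2022*".toList = ['-','\u2022','*'] from rfl,
      show "12345".toList = ['1','2','3','4','5'] from rfl, startswith_single]
    simp [List.any_cons, PySem.Chars.isdigit, Bool.beq_eq_decide_eq, Bool.or_assoc]

-- the "emit current item" step shared by the flush sites
def pvEmit (cur : List Char) : List (List Char) :=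
  if 15 < cur.length then [PySem.Chars.strip cur] else []

-- append one continuation line
def pvExt (cur l : List Char) : List Char :=
  if cur.isEmpty then l else cur ++ ' ' :: l

-- the common functional specification of one sweep over the non-empty lines
def pvF : List Char → List (List Char) → List (List Char)
  | cur, [] => pvEmit cur
  | cur, l :: rest =>
    if pvAStart l then pvEmit cur ++ pvF (pvLstripBullets l) rest
    else pvF (pvExt cur l) rest

def pvFlush (st : List (List Char) × List Char) : List (List Char) :=
  if !st.2.isEmpty && decide (15 < st.2.length) then st.1 ++ [PySem.Chars.strip st.2] else st.1

lemma flush_eq (items : List (List Char)) (cur : List Char) :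
    pvFlush (items, cur) = items ++ pvEmit cur := by
  rcases cur with _ | ⟨c, cs⟩ <;> simp [pvFlush, pvEmit] <;> split_ifs <;>
    simp_all <;> omega

-- A's loop ignores empty lines
lemma aLoop_filter (ls : List (List Char)) (st : List (List Char) × List Char) :
    pvALoop ls st = pvALoop (ls.filter (fun l => !l.isEmpty)) st := by
  induction ls generalizing st with
  | nil => rfl
  | cons l rest ih =>
    obtain ⟨items, cur⟩ := st
    rcases he : l.isEmpty with _ | _ <;> simp [pvALoop, List.filter_cons, he, ih]

-- A's loop computes pvF (on empty-free lines)
lemma aLoop_eq (ls : List (List Char)) (h : ∀ l ∈ ls, l ≠ [])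
    (items : List (List Char)) (cur : List Char) :
    pvFlush (pvALoop ls (items, cur)) = items ++ pvF cur ls := by
  induction ls generalizing items cur with
  | nil => simpa [pvALoop, pvF] using flush_eq items cur
  | cons l rest ih =>
    have hl : l ≠ [] := h l (by simp)
    have he : l.isEmpty = false := by simpa using hl
    have hr : ∀ x ∈ rest, x ≠ [] := fun x hx => h x (by simp [hx])
    rcases hs : pvAStart l with _ | _
    · simp only [pvALoop, he, hs, Bool.false_eq_true, if_false, pvF]
      rw [ih hr]
      have hext : (if !cur.isEmpty then cur ++ ' ' :: l else l) = pvExt cur l := by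
        rcases cur <;> simp [pvExt]
      rw [hext]
    · simp only [pvALoop, he, hs, Bool.false_eq_true, if_false, if_true, pvF]
      rw [ih hr, show (if !cur.isEmpty && decide (15 < cur.length)
            then items ++ [PySem.Chars.strip cur] else items) = pvFlush (items, cur) from rfl,
          flush_eq, List.append_assoc]

-- folding pvExt is the filtered join (on empty-free continuation lines)
lemma foldl_ext_join (cont : List (List Char)) (h : ∀ x ∈ cont, x ≠ []) (head : List Char) :
    List.foldl pvExt head cont
      = PySem.Chars.join " ".toList ((head :: cont).filter (fun p => !p.isEmpty)) := by
  induction cont generalizing head with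
  | nil =>
    rcases head with _ | ⟨c, cs⟩
    · simp [PySem.Chars.join_nil]
    · simp [PySem.Chars.join_singleton]
  | cons c cs ih =>
    have hc : c ≠ [] := h c (by simp)
    have hcs : ∀ x ∈ cs, x ≠ [] := fun x hx => h x (by simp [hx])
    simp only [List.foldl_cons]
    rw [ih hcs]
    rcases hh : head.isEmpty with _ | _
    · -- head nonempty: both filters keep their heads
      have hhe : ¬ head = [] := by simpa using hh
      have hce : (pvExt head c).isEmpty = false := by
        rcases head <;> simp_all [pvExt]
      simp only [pvExt, hh, Bool.not_false, if_false, List.filter_cons, hce,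
        show c.isEmpty = false from by simpa using hc, Bool.not_true, if_neg]
      rcases hf : cs.filter (fun p => !p.isEmpty) with _ | ⟨d, ds⟩ <;>
        rw [hf] <;> simp [PySem.Chars.join_singleton, PySem.Chars.join_cons_cons]
    · -- head = []
      have : head = [] := by simpa using hh
      subst this
      simp [pvExt]

-- pvF skips over a block of non-start lines by folding pvExt
lemma pvF_span (ls : List (List Char)) (cur : List Char) :
    pvF cur ls
      = pvF (List.foldl pvExt cur (ls.takeWhile (fun x => !pvAStart x)))
            (ls.dropWhile (fun x => !pvAStart x)) := by
  induction ls generalizing cur with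
  | nil => rfl
  | cons l rest ih =>
    rcases hs : pvAStart l with _ | _
    · simp [pvF, hs, List.takeWhile_cons, List.dropWhile_cons, ih]
    · simp [pvF, hs, List.takeWhile_cons, List.dropWhile_cons]

-- when the remainder is empty or begins with a start line, pvF emits then restarts
lemma pvF_emit_split (item : List Char) (ls : List (List Char))
    (h : ls = [] ∨ ∃ l r, ls = l :: r ∧ pvAStart l = true) :
    pvF item ls = pvEmit item ++ pvF [] ls := by
  rcases h with rfl | ⟨l, r, rfl, hs⟩
  · simp [pvF, pvEmit]
  · simp [pvF, hs, pvEmit]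

-- B's loop computes the k-prefix of pvF (on empty-free lines)
lemma bLoop_eq (n : Nat) (ls : List (List Char)) (hn : ls.length ≤ n)
    (h : ∀ l ∈ ls, l ≠ []) (k : Nat) (hk : 1 ≤ k) (f : Bool)
    (hf : f = true ∨ ls = [] ∨ ∃ l r, ls = l :: r ∧ pvAStart l = true) :
    pvBLoop f k ls = (pvF [] ls).take k := by
  induction n generalizing ls k f with
  | zero =>
    have hnil : ls = [] := List.eq_nil_of_length_eq_zero (Nat.le_zero.mp hn)
    subst hnil; simp [pvBLoop, pvF, pvEmit]
  | succ n ih =>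
    cases ls with
    | nil => simp [pvBLoop, pvF, pvEmit]
    | cons l rest =>
      have hl : l ≠ [] := h l (by simp)
      have hr : ∀ x ∈ rest, x ≠ [] := fun x hx => h x (by simp [hx])
      have hpred : (fun x : List Char => !pvBStart x) = (fun x => !pvAStart x) :=
        funext fun x => by rw [start_eq]
      rw [pvBLoop.eq_2, hpred]
      have hcontne : ∀ x ∈ rest.takeWhile (fun x => !pvAStart x), x ≠ [] :=
        fun x hx => hr x ((List.takeWhile_sublist _).subset hx)
      have hrlen : (rest.dropWhile (fun x => !pvAStart x)).length ≤ n :=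
        le_trans (List.length_dropWhile_le _ _) (Nat.lt_succ_iff.mp (by simpa using hn))
      have hrne : ∀ x ∈ rest.dropWhile (fun x => !pvAStart x), x ≠ [] :=
        fun x hx => hr x ((List.dropWhile_sublist _).subset hx)
      have hok : rest.dropWhile (fun x => !pvAStart x) = [] ∨
          ∃ l' r', rest.dropWhile (fun x => !pvAStart x) = l' :: r' ∧ pvAStart l' = true := by
        cases hd : rest.dropWhile (fun x => !pvAStart x) with
        | nil => exact Or.inl rfl
        | cons a b =>
          refine Or.inr ⟨a, b, rfl, ?_⟩
          have hne : rest.dropWhile (fun x : List Char => !pvAStart x) ≠ [] := by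
            rw [hd]; simp
          have h2 := List.head_dropWhile_not (fun x : List Char => !pvAStart x) hne
          have hhead : (rest.dropWhile (fun x : List Char => !pvAStart x)).head hne = a := by
            simp [hd]
          rw [hhead] at h2
          simpa using h2
      rcases hs : pvAStart l with _ | _
      · -- continuation-style first line: hf forces f = true, head = l
        have hft : f = true := by
          rcases hf with hft | hnil | ⟨l', r', heq, hs'⟩
          · exact hft
          · cases hnil
          · injection heq with h1 _; subst h1; rw [hs'] at hs; cases hs
        subst hft
        have hbs : pvBStart l = false := by rw [start_eq]; exact hs
        rw [hbs]
        have hFstep : pvF [] (l :: rest) = pvF (List.foldl pvExt l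
            (rest.takeWhile (fun x => !pvAStart x))) (rest.dropWhile (fun x => !pvAStart x)) := by
          rw [show pvF [] (l :: rest) = pvF (pvExt [] l) rest from by simp [pvF, hs],
              show pvExt [] l = l from by simp [pvExt], pvF_span]
        rw [foldl_ext_join _ hcontne l] at hFstep
        rw [hFstep, pvF_emit_split _ _ hok]
        simp only [Bool.not_false, Bool.and_true, if_true, pvEmit]
        rcases h15 : decide (15 < (PySem.Chars.join " ".toList
            ((l :: rest.takeWhile fun x => !pvAStart x).filter (fun p => !p.isEmpty))).length) with _ | _
        · simp only [Bool.false_eq_true, if_false]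
          rw [ih _ hrlen hrne k hk false (Or.inr hok),
              if_neg (by simpa using h15), List.nil_append]
        · simp only [if_true]
          simp only [decide_eq_true_eq] at h15
          rw [if_pos h15]
          obtain ⟨k', rfl⟩ : ∃ k', k = k' + 1 := ⟨k - 1, by omega⟩
          rcases Nat.eq_zero_or_pos k' with rfl | hk'
          · simp
          · rw [if_neg (by omega), Nat.add_sub_cancel]
            rw [ih _ hrlen hrne k' (by omega) false (Or.inr hok)]
            simp
      · -- start line: head = lstripped l
        have hbs : pvBStart l = true := by rw [start_eq]; exact hs
        rw [hbs]
        have hFstep : pvF [] (l :: rest) = pvF (List.foldl pvExt (pvLstripBullets l)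
            (rest.takeWhile (fun x => !pvAStart x))) (rest.dropWhile (fun x => !pvAStart x)) := by
          rw [show pvF [] (l :: rest) = pvF (pvLstripBullets l) rest from by simp [pvF, hs, pvEmit],
              pvF_span]
        rw [foldl_ext_join _ hcontne (pvLstripBullets l)] at hFstep
        rw [hFstep, pvF_emit_split _ _ hok]
        simp only [Bool.not_true, Bool.and_false, Bool.false_eq_true, if_false, pvEmit]
        rcases h15 : decide (15 < (PySem.Chars.join " ".toList
            ((pvLstripBullets l :: rest.takeWhile fun x => !pvAStart x).filter (fun p => !p.isEmpty))).length) with _ | _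
        · simp only [Bool.false_eq_true, if_false]
          rw [ih _ hrlen hrne k hk false (Or.inr hok),
              if_neg (by simpa using h15), List.nil_append]
        · simp only [if_true]
          simp only [decide_eq_true_eq] at h15
          rw [if_pos h15]
          obtain ⟨k', rfl⟩ : ∃ k', k = k' + 1 := ⟨k - 1, by omega⟩
          rcases Nat.eq_zero_or_pos k' with rfl | hk'
          · simp
          · rw [if_neg (by omega), Nat.add_sub_cancel]
            rw [ih _ hrlen hrne k' (by omega) false (Or.inr hok)]
            simp

-- ===== VERDICT (by name: the statement is the Claim_ definition above) =====
theorem extract_mistral_management_py_spec : Claim_equal_extract_mistral_management_py := by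
  intro content _
  unfold Spec_extract_mistral_management_py
  simp only [extract_mistral_management_py, extract_mistral_management_py_alt]
  have hne : ∀ l ∈ (content.map String.toList).filter (fun l => !l.isEmpty), l ≠ [] := by
    intro l hl
    simpa using List.of_mem_filter hl
  have hA := aLoop_eq _ hne [] []
  unfold pvFlush at hA
  simp only [List.nil_append] at hA
  rw [aLoop_filter, hA,
      bLoop_eq ((content.map String.toList).filter (fun l => !l.isEmpty)).length _
        le_rfl hne 8 (by omega) true (Or.inl rfl)]
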